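-- pv_equiv track=rewrite | github.com/huynhnhatminh20/HyperAgents-Locally-Kaggle- | tui.py | vertical_score_chart
-- ===== SOURCE A (Python) =====
-- def score_color(s):
--     return "bright_green" if s >= 7 else "yellow" if s >= 4 else "red"
--
-- def vertical_score_chart(scores, max_val=10):
--     """Return list of plain strings forming a vertical bar chart (ANSI colored)."""
--     if not scores: return ["(no scores yet)"]
--     lines = []
--     ANSI = {"bright_green": "92", "yellow": "93", "red": "91"}
--     for level in range(max_val, 0, -1):
--         prefix = f"{level:>3} │" if level % 2 == 0 else "    │"
--         row = prefix
--         for sc in scores: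
--             if sc >= level:
--                 col = ANSI[score_color(sc)]
--                 row += f"\x1b[{col}m██\x1b[0m  "
--             else:
--                 row += "    "
--         lines.append(row)
--     lines.append("    └" + "────" * len(scores))
--     lines.append("     " + "".join(f"R{i+1:<3}" for i in range(len(scores))))
--     return lines
-- ===== SOURCE B (Python) =====
-- def vertical_score_chart(scores, max_val=10):
--     """Return list of plain strings forming a vertical bar chart (ANSI colored).
--
--     Column-major rebuild: precompute each score's colored bar cell once, build one
--     column of cells per score (top level down to 1), then transpose with zip(*...)
--     to emit the rows."""
--     if not scores:
--         return ["(no scores yet)"]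
--     levels = list(range(max_val, 0, -1))
--     cols = []
--     for sc in scores:
--         bar = "\x1b[" + ("92" if sc >= 7 else "93" if sc >= 4 else "91") + "m\u2588\u2588\x1b[0m  "
--         cols.append([bar if sc >= lv else "    " for lv in levels])
--     lines = [
--         (f"{lv:>3} \u2502" if lv % 2 == 0 else "    \u2502") + "".join(cells)
--         for lv, cells in zip(levels, zip(*cols))
--     ]
--     lines.append("    \u2514" + "\u2500\u2500\u2500\u2500" * len(scores))
--     lines.append("     " + "".join(f"R{i+1:<3}" for i in range(len(scores))))
--     return lines
-- ===== Notes on version B (the rewrite author's own statement) =====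
-- stated objective: alternative
-- what changed: B builds the chart column-major: each score's ANSI bar cell is computed once and its whole column of cells is built, then the columns are transposed with zip(*cols) into rows, instead of A's row-major nested loop that re-derives the color and concatenates cell by cell for every row.
import Mathlib
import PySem

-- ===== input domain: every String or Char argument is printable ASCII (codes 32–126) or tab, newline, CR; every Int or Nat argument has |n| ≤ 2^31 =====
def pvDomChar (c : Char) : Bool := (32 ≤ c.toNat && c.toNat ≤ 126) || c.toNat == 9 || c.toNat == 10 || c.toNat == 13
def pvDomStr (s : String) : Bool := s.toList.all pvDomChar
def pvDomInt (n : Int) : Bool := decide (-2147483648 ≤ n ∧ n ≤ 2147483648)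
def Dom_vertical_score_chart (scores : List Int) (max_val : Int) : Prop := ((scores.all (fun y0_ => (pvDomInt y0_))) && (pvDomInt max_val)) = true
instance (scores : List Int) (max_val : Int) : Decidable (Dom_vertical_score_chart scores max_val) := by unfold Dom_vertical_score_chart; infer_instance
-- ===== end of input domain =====

-- B rebuilds the chart column-major (one precomputed bar cell and one column per score, then a zip(*) transpose into rows) instead of A's row-major nested concatenation loop; same output.

-- shared helpers: both Python sources contain this identical formatting code
-- f"{n:>3}" (right-align str(n) in width 3 with spaces); exact for ints
def pvPad3 (n : Int) : String :=
  let s := PySem.Int.toStr n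
  String.ofList (List.replicate (3 - s.toList.length) ' ') ++ s
-- the row prefix: f"{level:>3} │" if level % 2 == 0 else "    │"
def pvLabel (lv : Int) : String :=
  if PySem.Int.mod lv 2 = 0 then pvPad3 lv ++ " │" else "    │"
-- "────" * n  (string repetition, n ≥ 0); exact
def pvRepeat (s : String) (n : Nat) : String := String.join (List.replicate n s)
-- "".join(...) over a list of strings; exact (empty separator = plain concatenation)
def pvConcat (l : List String) : String := l.foldl (· ++ ·) ""
-- "     " + "".join(f"R{i+1:<3}" for i in range(n))  (f"{m:<3}" left-aligns str(m) in width 3)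
def pvAxis (n : Nat) : String :=
  "     " ++ pvConcat ((List.range n).map (fun i =>
    let s := PySem.Int.toStr ((i : Int) + 1)
    "R" ++ s ++ String.ofList (List.replicate (3 - s.toList.length) ' ')))

-- ===== PORT A =====
def score_color (s : Int) : String :=
  if s ≥ 7 then "bright_green" else if s ≥ 4 then "yellow" else "red"

def pvANSI : PySem.Dict String String :=
  PySem.Dict.ofList [("bright_green", "92"), ("yellow", "93"), ("red", "91")]

-- literal port of A: row-major loop, row built by repeated concatenation.
-- ANSI[k] would raise KeyError on a missing key; score_color always returns a present key, so .getD "" is never the default.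
def vertical_score_chart (scores : List Int) (max_val : Int) : List String :=
  if scores = [] then ["(no scores yet)"] else
  let lines : List String :=
    (PySem.List.pyRange max_val 0 (-1)).foldl (fun lines level =>
      let row := scores.foldl (fun row sc =>
        if sc ≥ level then
          row ++ ("\x1b[" ++ (pvANSI.get? (score_color sc)).getD "" ++ "m██\x1b[0m  ")
        else
          row ++ "    ") (pvLabel level)
      lines ++ [row]) []
  let lines := lines ++ ["    └" ++ pvRepeat "────" scores.length]
  lines ++ [pvAxis scores.length]

-- ===== PORT B =====
def pvBar (sc : Int) : String :=
  "\x1b[" ++ (if sc ≥ 7 then "92" else if sc ≥ 4 then "93" else "91") ++ "m██\x1b[0m  "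

-- zip(*cols): take the heads of all columns while none is exhausted
def pvZipStar (cols : List (List String)) : List (List String) :=
  if hcase : cols = [] ∨ cols.any List.isEmpty then []
  else (cols.map (fun c => c.headD "")) :: pvZipStar (cols.map List.tail)
termination_by (cols.headD []).length
decreasing_by
  simp only [not_or] at hcase
  obtain ⟨h1, h2⟩ := hcase
  cases cols with
  | nil => exact absurd rfl h1
  | cons c rest =>
    cases c with
    | nil => simp at h2
    | cons x xs =>
      simp only [List.headD_cons, List.length_cons]
      exact Nat.lt_succ_self _

-- literal port of B: per-score columns, then transpose into rows
def vertical_score_chart_alt (scores : List Int) (max_val : Int) : List String :=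
  if scores = [] then ["(no scores yet)"] else
  let levels := PySem.List.pyRange max_val 0 (-1)
  let cols := scores.map (fun sc =>
    let bar := pvBar sc
    levels.map (fun lv => if sc ≥ lv then bar else "    "))
  let lines := (levels.zip (pvZipStar cols)).map (fun p => pvLabel p.1 ++ pvConcat p.2)
  (lines ++ ["    └" ++ pvRepeat "────" scores.length]) ++ [pvAxis scores.length]

-- ===== PRECONDITION & SPEC =====
def Spec_vertical_score_chart (scores : List Int) (max_val : Int) (out : List String) : Prop := out = vertical_score_chart_alt scores max_val
instance (scores : List Int) (max_val : Int) (out : List String) : Decidable (Spec_vertical_score_chart scores max_val out) := by unfold Spec_vertical_score_chart; infer_instance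

-- ===== CLAIM (what is proved, stated in full; the proofs are below) =====
def Claim_equal_vertical_score_chart : Prop := ∀ (scores : List Int) (max_val : Int), Dom_vertical_score_chart scores max_val → Spec_vertical_score_chart scores max_val (vertical_score_chart scores max_val)

-- ===== LEMMAS AND PROOFS =====

-- A's bar cell equals B's precomputed bar
theorem pv_bar_eq (sc : Int) :
    "\x1b[" ++ (pvANSI.get? (score_color sc)).getD "" ++ "m██\x1b[0m  " = pvBar sc := by
  unfold pvBar score_color
  split_ifs <;> rfl

theorem pv_foldl_str_congr : ∀ (l : List String) (p q : String),
    l.foldl (· ++ ·) (p ++ q) = p ++ l.foldl (· ++ ·) q := by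
  intro l
  induction l with
  | nil => intro p q; rfl
  | cons a l ih =>
    intro p q
    simp only [List.foldl_cons]
    rw [String.append_assoc, ih]

theorem pv_foldl_append_str (g : Int → String) (l : List Int) (p : String) :
    l.foldl (fun r x => r ++ g x) p = p ++ pvConcat (l.map g) := by
  rw [← List.foldl_map]
  unfold pvConcat
  calc (l.map g).foldl (· ++ ·) p
      = (l.map g).foldl (· ++ ·) (p ++ "") := by rw [String.append_empty]
    _ = p ++ (l.map g).foldl (· ++ ·) "" := pv_foldl_str_congr _ _ _

theorem pv_foldl_append_list {α : Type} (f : Int → α) (l : List Int) :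
    ∀ acc : List α, l.foldl (fun ls x => ls ++ [f x]) acc = acc ++ l.map f := by
  induction l with
  | nil => intro acc; simp
  | cons a l ih => intro acc; simp [ih]

theorem pv_zipStar_map (cell : Int → Int → String) :
    ∀ (levels scores : List Int), scores ≠ [] →
      pvZipStar (scores.map (fun sc => levels.map (cell sc)))
        = levels.map (fun lv => scores.map (fun sc => cell sc lv)) := by
  intro levels
  induction levels with
  | nil =>
    intro scores hs
    cases scores with
    | nil => exact absurd rfl hs
    | cons s rest =>
      rw [pvZipStar, dif_pos]
      · rfl
      · right; simp
  | cons lv lvs ih =>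
    intro scores hs
    rw [pvZipStar, dif_neg]
    · have hH : ((scores.map (fun sc => (lv :: lvs).map (cell sc))).map (fun c => c.headD ""))
          = scores.map (fun sc => cell sc lv) := by
        simp [Function.comp]
      have hT : ((scores.map (fun sc => (lv :: lvs).map (cell sc))).map List.tail)
          = scores.map (fun sc => lvs.map (cell sc)) := by
        simp [Function.comp]
      rw [hH, hT, ih scores hs, List.map_cons]
    · simp only [not_or]
      constructor
      · simp [hs]
      · simp

theorem pv_zip_map (l : List Int) (f : Int → List String) :
    (l.zip (l.map f)).map (fun p => pvLabel p.1 ++ pvConcat p.2)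
      = l.map (fun x => pvLabel x ++ pvConcat (f x)) := by
  induction l with
  | nil => rfl
  | cons a l ih => simp [ih]

-- ===== VERDICT (by name: the statement is the Claim_ definition above) =====
theorem vertical_score_chart_spec : Claim_equal_vertical_score_chart := by
  intro scores max_val _
  unfold Spec_vertical_score_chart vertical_score_chart vertical_score_chart_alt
  by_cases hs : scores = []
  · simp [hs]
  · rw [if_neg hs, if_neg hs]
    dsimp only
    rw [pv_zipStar_map (fun sc lv => if sc ≥ lv then pvBar sc else "    ") _ _ hs]
    rw [pv_zip_map]
    rw [pv_foldl_append_list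
      (fun level => scores.foldl (fun row sc =>
        if sc ≥ level then
          row ++ ("\x1b[" ++ (pvANSI.get? (score_color sc)).getD "" ++ "m██\x1b[0m  ")
        else row ++ "    ") (pvLabel level))]
    simp only [List.nil_append, List.append_assoc]
    congr 1
    apply List.map_congr_left
    intro lv _
    have hfun : (fun (row : String) (sc : Int) =>
            if sc ≥ lv then row ++ ("\x1b[" ++ (pvANSI.get? (score_color sc)).getD "" ++ "m██\x1b[0m  ")
            else row ++ "    ")
          = fun (row : String) (sc : Int) => row ++ (if sc ≥ lv then pvBar sc else "    ") := by
      funext row sc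
      by_cases h : sc ≥ lv
      · rw [if_pos h, if_pos h, pv_bar_eq]
      · rw [if_neg h, if_neg h]
    rw [hfun, pv_foldl_append_str]
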